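-- pv_equiv track=rewrite | github.com/Team74/FRC_2017_Python | tthhiinnggyy.py | uncode
-- ===== SOURCE A (Python) =====
-- def uncode(string):
-- 	stuff = []
-- 	number = ""
-- 	state = "previous"
-- 	for char in string:
-- 		if state == "previous":
-- 			if char == "s":
-- 				state = "start"
-- 		elif state == "start":
-- 			if char == "m":
-- 				state = "read"
-- 		elif state == "read":
-- 			if char == "m":
-- 				stuff.append(number)
-- 				number = ""
-- 			elif char == "e":
-- 				stuff.append(number)
-- 				number = ""
-- 				state == "previous"
-- 			else:
-- 				number += char
-- 	return stuff
-- ===== SOURCE B (Python) =====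
-- def uncode(string):
--     i = string.find('s')
--     if i == -1:
--         return []
--     j = string.find('m', i + 1)
--     if j == -1:
--         return []
--     parts = string[j + 1:].replace('e', 'm').split('m')
--     return parts[:-1]
-- ===== Notes on version B (the rewrite author's own statement) =====
-- stated objective: simpler
-- what changed: B replaces A's three-state character-by-character state machine with prefix location via str.find (first 's', then first 'm' after it) followed by a single replace/split on the delimiters, dropping the last (un-flushed) segment.
import Mathlib
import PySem

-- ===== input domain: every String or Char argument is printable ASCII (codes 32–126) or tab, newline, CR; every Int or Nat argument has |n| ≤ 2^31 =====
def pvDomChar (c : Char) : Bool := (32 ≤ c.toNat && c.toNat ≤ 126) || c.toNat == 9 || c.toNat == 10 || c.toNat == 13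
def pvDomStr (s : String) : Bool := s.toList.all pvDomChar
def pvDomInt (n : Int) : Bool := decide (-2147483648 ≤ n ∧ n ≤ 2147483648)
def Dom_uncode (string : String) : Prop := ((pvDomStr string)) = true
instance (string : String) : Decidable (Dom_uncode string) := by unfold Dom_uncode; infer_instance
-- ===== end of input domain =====

-- B replaces A's three-state character state machine by locating the "…s…m" prefix with find and then replace/split on the delimiters, dropping the trailing segment; objective: simpler.

-- ===== PORT A =====
-- A's state variable holds one of the strings "previous"/"start"/"read"; ported as a 3-value enum.
inductive PvSt | previous | start | read
deriving DecidableEq, Repr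

-- the accumulating string `number` is carried as its list of characters (Python `number += char` = `number ++ [char]`)
def uncodeStep (acc : List String × List Char × PvSt) (char : Char) : List String × List Char × PvSt :=
  match acc with
  | (stuff, number, .previous) =>
      if char = 's' then (stuff, number, .start) else (stuff, number, .previous)
  | (stuff, number, .start) =>
      if char = 'm' then (stuff, number, .read) else (stuff, number, .start)
  | (stuff, number, .read) =>
      if char = 'm' then (stuff ++ [String.ofList number], [], .read)
      else if char = 'e' then (stuff ++ [String.ofList number], [], .read)
        -- A's `state == "previous"` here is a comparison expression, not an assignment: the state stays "read"
      else (stuff, number ++ [char], .read)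

def uncode (string : String) : List String :=
  (string.toList.foldl uncodeStep ([], [], .previous)).1

-- ===== PORT B =====
def uncode_alt (string : String) : List String :=
  let i := PySem.Str.find string "s"
  if i = -1 then []
  else
    let j := PySem.Str.findFrom string "m" (i + 1)
    if j = -1 then []
    else
      let parts := (PySem.Str.split? (PySem.Str.replace (PySem.Str.slice string (some (j + 1)) none) "e" "m") "m").getD []
      PySem.List.slice parts none (some (-1))

-- ===== PRECONDITION & SPEC =====
def Spec_uncode (string : String) (out : List String) : Prop := out = uncode_alt string
instance (string : String) (out : List String) : Decidable (Spec_uncode string out) := by unfold Spec_uncode; infer_instance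

-- ===== CLAIM (what is proved, stated in full; the proofs are below) =====
def Claim_equal_uncode : Prop := ∀ (string : String), Dom_uncode string → Spec_uncode string (uncode string)

-- ===== LEMMAS AND PROOFS =====

-- map 'e' to 'm' (what B's replace does, character by character)
def eToM (c : Char) : Char := if c = 'e' then 'm' else c

-- split on 'm' only, keeping the trailing segment
def splitM : List Char → List (List Char)
  | [] => [[]]
  | c :: t =>
      if c = 'm' then [] :: splitM t
      else
        match splitM t with
        | [] => [[c]]
        | s :: ss => (c :: s) :: ss

-- prepend p to the first segment
def consFirst (p : List Char) : List (List Char) → List (List Char)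
  | [] => [p]
  | s :: ss => (p ++ s) :: ss

lemma splitM_ne_nil (l : List Char) : splitM l ≠ [] := by
  cases l with
  | nil => simp [splitM]
  | cons c t =>
      simp only [splitM]
      split
      · simp
      · split <;> simp

lemma consFirst_nil (xs : List (List Char)) (h : xs ≠ []) : consFirst [] xs = xs := by
  cases xs with
  | nil => exact absurd rfl h
  | cons s ss => simp [consFirst]

lemma rep_go (l : List Char) : ∀ (fuel : Nat) (acc : List Char), l.length ≤ fuel →
    PySem.Chars.replace.go ['e'] ['m'] fuel l acc = acc.reverse ++ l.map eToM := by
  induction l with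
  | nil => intro fuel acc _; cases fuel <;> simp [PySem.Chars.replace.go]
  | cons c t ih =>
      intro fuel acc h
      cases fuel with
      | zero => simp at h
      | succ f =>
          simp only [PySem.Chars.replace.go, List.isPrefixOf]
          by_cases hc : c = 'e'
          · subst hc
            simp only [beq_self_eq_true, Bool.true_and, if_pos]
            rw [show List.drop ['e'].length ('e' :: t) = t from rfl,
                ih f _ (by simpa using h)]
            simp [eToM]
          · rw [if_neg (by simp; intro h'; exact hc h'.symm)]
            rw [ih f _ (by simpa using h)]
            simp [eToM, hc]

lemma replace_em (l : List Char) : PySem.Chars.replace l ['e'] ['m'] = l.map eToM := by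
  rw [PySem.Chars.replace, if_neg (by simp)]
  simpa using rep_go l l.length [] le_rfl

lemma split_go (l : List Char) : ∀ (fuel : Nat) (cur : List Char) (acc : List (List Char)), l.length ≤ fuel →
    PySem.Chars.splitOn.go ['m'] fuel l cur acc = acc.reverse ++ consFirst cur.reverse (splitM l) := by
  induction l with
  | nil =>
      intro fuel cur acc _
      cases fuel <;> simp [PySem.Chars.splitOn.go, splitM, consFirst]
  | cons c t ih =>
      intro fuel cur acc h
      cases fuel with
      | zero => simp at h
      | succ f =>
          simp only [PySem.Chars.splitOn.go, List.isPrefixOf]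
          by_cases hc : c = 'm'
          · subst hc
            simp only [beq_self_eq_true, Bool.true_and, if_pos]
            rw [show List.drop ['m'].length ('m' :: t) = t from rfl,
                ih f _ _ (by simpa using h)]
            simp only [List.reverse_nil]
            rw [consFirst_nil _ (splitM_ne_nil t)]
            simp [splitM, consFirst]
          · rw [if_neg (by simp; intro h'; exact hc h'.symm)]
            rw [ih f _ _ (by simpa using h)]
            simp only [splitM, if_neg hc, List.reverse_cons]
            rcases hs : splitM t with _ | ⟨s, ss⟩
            · exact absurd hs (splitM_ne_nil t)
            · simp [consFirst]

lemma splitOn_m (l : List Char) : PySem.Chars.splitOn l ['m'] = splitM l := by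
  rw [PySem.Chars.splitOn, split_go l (l.length + 1) [] [] (by omega)]
  simp [consFirst_nil _ (splitM_ne_nil l)]

lemma find_go_single (l : List Char) (c : Char) : ∀ k : Nat,
    PySem.Chars.find.go [c] l k = if c ∈ l then ((k : Int) + l.idxOf c) else -1 := by
  induction l with
  | nil => intro k; simp [PySem.Chars.find.go]
  | cons h t ih =>
      intro k
      simp only [PySem.Chars.find.go, List.isPrefixOf]
      by_cases hc : h = c
      · subst hc
        simp
      · rw [if_neg (by simp; intro h'; exact hc h'.symm), ih (k + 1)]
        have hch : (h == c) = false := beq_eq_false_iff_ne.mpr hc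
        simp only [List.mem_cons, List.idxOf_cons, hch, cond_false]
        by_cases hm : c ∈ t
        · simp only [hm, or_true, if_pos]
          push_cast
          ring
        · simp only [hm, or_false]
          rw [if_neg (show ¬c = h from fun h' => hc h'.symm)]
          simp

lemma find_single (l : List Char) (c : Char) :
    PySem.Chars.find l [c] = if c ∈ l then (l.idxOf c : Int) else -1 := by
  rw [PySem.Chars.find, find_go_single]
  simp

lemma slice_from' (xs : List Char) (a : Int) (h : 0 ≤ a) :
    PySem.List.slice xs (some a) none = xs.drop a.toNat := by
  rcases Int.eq_ofNat_of_zero_le h with ⟨n, rfl⟩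
  rw [PySem.List.slice_some_none, PySem.List.clampIdx_natCast]
  rcases le_or_gt n xs.length with hle | hgt
  · simp [min_eq_left hle]
  · simp [min_eq_right (le_of_lt hgt)]
    omega

lemma readFold (l : List Char) : ∀ (stuff : List String) (num : List Char),
    (l.foldl uncodeStep (stuff, num, .read)).1
      = stuff ++ ((consFirst num (splitM (l.map eToM))).dropLast).map String.ofList := by
  induction l with
  | nil =>
      intro stuff num
      simp [splitM, consFirst]
  | cons c t ih =>
      intro stuff num
      by_cases hm : c = 'm'
      · subst hm
        rw [List.foldl_cons, show uncodeStep (stuff, num, .read) 'm'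
              = (stuff ++ [String.ofList num], [], .read) from by simp [uncodeStep], ih]
        rw [consFirst_nil _ (splitM_ne_nil _)]
        rw [show List.map eToM ('m' :: t) = 'm' :: t.map eToM from by simp [eToM]]
        rw [show splitM ('m' :: t.map eToM) = [] :: splitM (t.map eToM) from by simp [splitM]]
        rw [show consFirst num ([] :: splitM (t.map eToM)) = num :: splitM (t.map eToM)
              from by simp [consFirst]]
        rw [List.dropLast_cons_of_ne_nil (splitM_ne_nil _)]
        simp
      · by_cases he : c = 'e'
        · subst he
          rw [List.foldl_cons, show uncodeStep (stuff, num, .read) 'e'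
                = (stuff ++ [String.ofList num], [], .read) from by simp [uncodeStep], ih]
          rw [consFirst_nil _ (splitM_ne_nil _)]
          rw [show List.map eToM ('e' :: t) = 'm' :: t.map eToM from by simp [eToM]]
          rw [show splitM ('m' :: t.map eToM) = [] :: splitM (t.map eToM) from by simp [splitM]]
          rw [show consFirst num ([] :: splitM (t.map eToM)) = num :: splitM (t.map eToM)
                from by simp [consFirst]]
          rw [List.dropLast_cons_of_ne_nil (splitM_ne_nil _)]
          simp
        · rw [List.foldl_cons, show uncodeStep (stuff, num, .read) c
                = (stuff, num ++ [c], .read) from by simp [uncodeStep, hm, he], ih]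
          rw [show List.map eToM (c :: t) = c :: t.map eToM from by simp [eToM, he]]
          rcases hs : splitM (t.map eToM) with _ | ⟨s, ss⟩
          · exact absurd hs (splitM_ne_nil _)
          · rw [show splitM (c :: t.map eToM) = (c :: s) :: ss from by simp [splitM, hm, hs]]
            simp [consFirst]

lemma prevFold_not_mem (l : List Char) (stuff : List String) (num : List Char) (h : 's' ∉ l) :
    l.foldl uncodeStep (stuff, num, .previous) = (stuff, num, .previous) := by
  induction l with
  | nil => rfl
  | cons c t ih =>
      rw [List.foldl_cons, show uncodeStep (stuff, num, .previous) c = (stuff, num, .previous)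
            from by simp [uncodeStep]; intro h'; exact absurd (h' ▸ List.mem_cons_self ..) h]
      exact ih (fun h' => h (List.mem_cons_of_mem _ h'))

lemma prevFold_mem (l : List Char) : ∀ (stuff : List String) (num : List Char), 's' ∈ l →
    l.foldl uncodeStep (stuff, num, .previous)
      = (l.drop (l.idxOf 's' + 1)).foldl uncodeStep (stuff, num, .start) := by
  induction l with
  | nil => intro _ _ h; simp at h
  | cons c t ih =>
      intro stuff num h
      by_cases hc : c = 's'
      · subst hc
        simp [uncodeStep]
      · have ht : 's' ∈ t := (List.mem_cons.mp h).resolve_left (fun h' => hc h'.symm)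
        rw [List.foldl_cons, show uncodeStep (stuff, num, .previous) c = (stuff, num, .previous)
              from by simp [uncodeStep]; intro h'; exact hc h', ih _ _ ht]
        have hcs : (c == 's') = false := beq_eq_false_iff_ne.mpr hc
        rw [List.idxOf_cons, hcs]
        simp

lemma startFold_not_mem (l : List Char) (stuff : List String) (num : List Char) (h : 'm' ∉ l) :
    l.foldl uncodeStep (stuff, num, .start) = (stuff, num, .start) := by
  induction l with
  | nil => rfl
  | cons c t ih =>
      rw [List.foldl_cons, show uncodeStep (stuff, num, .start) c = (stuff, num, .start)
            from by simp [uncodeStep]; intro h'; exact absurd (h' ▸ List.mem_cons_self ..) h]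
      exact ih (fun h' => h (List.mem_cons_of_mem _ h'))

lemma startFold_mem (l : List Char) : ∀ (stuff : List String) (num : List Char), 'm' ∈ l →
    l.foldl uncodeStep (stuff, num, .start)
      = (l.drop (l.idxOf 'm' + 1)).foldl uncodeStep (stuff, num, .read) := by
  induction l with
  | nil => intro _ _ h; simp at h
  | cons c t ih =>
      intro stuff num h
      by_cases hc : c = 'm'
      · subst hc
        simp [uncodeStep]
      · have ht : 'm' ∈ t := (List.mem_cons.mp h).resolve_left (fun h' => hc h'.symm)
        rw [List.foldl_cons, show uncodeStep (stuff, num, .start) c = (stuff, num, .start)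
              from by simp [uncodeStep]; intro h'; exact hc h', ih _ _ ht]
        have hcs : (c == 'm') = false := beq_eq_false_iff_ne.mpr hc
        rw [List.idxOf_cons, hcs]
        simp

lemma main_lemma (string : String) : uncode string = uncode_alt string := by
  unfold uncode uncode_alt
  have hfind : PySem.Str.find string "s"
      = (if 's' ∈ string.toList then (string.toList.idxOf 's' : Int) else -1) := by
    rw [PySem.Str.find_eq, show ("s" : String).toList = ['s'] from rfl, find_single]
  by_cases hs : 's' ∈ string.toList
  · rw [hfind, if_pos hs]
    have hlt : string.toList.idxOf 's' < string.toList.length := List.idxOf_lt_length_of_mem hs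
    rw [if_neg (by omega)]
    have hj : PySem.Str.findFrom string "m" ((string.toList.idxOf 's' : Int) + 1)
        = PySem.Chars.findFrom string.toList ['m'] ((string.toList.idxOf 's' + 1 : Nat) : Int) := by
      rw [PySem.Str.findFrom_eq, show ("m" : String).toList = ['m'] from rfl]
      norm_num
    rw [hj, PySem.Chars.findFrom_natCast string.toList ['m'] (string.toList.idxOf 's' + 1) (by omega)]
    rw [find_single]
    by_cases hm : 'm' ∈ string.toList.drop (string.toList.idxOf 's' + 1)
    · rw [if_pos hm, if_neg (by omega), if_neg (by omega)]
      -- A side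
      rw [prevFold_mem _ _ _ hs, startFold_mem _ _ _ hm, readFold]
      rw [consFirst_nil _ (splitM_ne_nil _), List.drop_drop]
      -- B side
      rw [PySem.Str.split?, PySem.Str.toList_replace, PySem.Str.toList_slice,
          PySem.Chars.slice_eq_listSlice, slice_from' _ _ (by omega)]
      simp only [show ("e" : String).toList = ['e'] from rfl,
        show ("m" : String).toList = ['m'] from rfl]
      rw [replace_em, PySem.Chars.split?, if_neg (by simp), splitOn_m]
      simp only [Option.map_some, Option.getD_some, PySem.List.slice_to_neg_one]
      rw [← List.map_dropLast]
      have harg : ((string.toList.idxOf 's' + 1 : Nat) : Int)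
            + ((string.toList.drop (string.toList.idxOf 's' + 1)).idxOf 'm' : Int) + 1
          = ((string.toList.idxOf 's' + 1)
              + ((string.toList.drop (string.toList.idxOf 's' + 1)).idxOf 'm' + 1) : Nat) := by
        push_cast; ring
      rw [harg, Int.toNat_natCast]
      simp
    · rw [if_neg hm, if_pos rfl, if_pos rfl]
      rw [prevFold_mem _ _ _ hs, startFold_not_mem _ _ _ hm]
  · rw [hfind, if_neg hs, if_pos rfl]
    rw [prevFold_not_mem _ _ _ hs]

-- ===== VERDICT (by name: the statement is the Claim_ definition above) =====
theorem uncode_spec : Claim_equal_uncode := by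
  intro string _
  exact main_lemma string
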